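-- pv_equiv track=rewrite | github.com/BlackSoi1/code_preview | util/table_schema.py | format_postgresql_create_table
-- ===== SOURCE A (Python) =====
-- def format_postgresql_create_table(
--     table_name, columns_info, primary_keys, foreign_keys
-- ):
--     """
--     Format a PostgreSQL CREATE TABLE statement based on the given schema information.
--
--     Args:
--         table_name (str): Name of the table.
--         columns_info (list): A list of tuples (column_name, data_type, is_nullable, column_default).
--         primary_keys (list or None): List of primary key columns.
--         foreign_keys (list or None): List of foreign key constraints as tuples (fk_column, ref_table, ref_column).
--
--     Returns:
--         str: A CREATE TABLE statement.
--     """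
--     lines = [f"CREATE TABLE {table_name} ("]
--     for i, column in enumerate(columns_info):
--         column_name, data_type, is_nullable, column_default = column
--         null_status = "NULL" if is_nullable == "YES" else "NOT NULL"
--         default = f"DEFAULT {column_default}" if column_default else ""
--         column_line = f"    {column_name} {data_type} {null_status} {default}".strip()
--
--         # Add a comma if there are more columns, primary keys, or foreign keys following
--         if i < len(columns_info) - 1 or primary_keys or foreign_keys:
--             column_line += ","
--         lines.append(column_line)
--
--     if primary_keys:
--         pk_line = f"    PRIMARY KEY ({', '.join(primary_keys)})"
--         if foreign_keys:
--             pk_line += ","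
--         lines.append(pk_line)
--
--     if foreign_keys:
--         for fk in foreign_keys:
--             fk_column, ref_table, ref_column = fk
--             fk_line = (
--                 f"    FOREIGN KEY ({fk_column}) REFERENCES {ref_table}({ref_column})"
--             )
--             if fk != foreign_keys[-1]:
--                 fk_line += ","
--             lines.append(fk_line)
--
--     lines.append(");")
--     return "\n".join(lines)
-- ===== SOURCE B (Python) =====
-- def format_postgresql_create_table(
--     table_name, columns_info, primary_keys, foreign_keys
-- ):
--     # Build bottom-up: traverse the clauses in REVERSE order, threading a 'seen'
--     # flag; a clause gets a trailing comma iff some clause was already emitted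
--     # below it.  Reverse the accumulated lines at the end.
--     tail = [");"]
--     seen = False
--
--     for fk_column, ref_table, ref_column in reversed(foreign_keys or []):
--         line = f"    FOREIGN KEY ({fk_column}) REFERENCES {ref_table}({ref_column})"
--         tail.append(line + "," if seen else line)
--         seen = True
--
--     if primary_keys:
--         line = f"    PRIMARY KEY ({', '.join(primary_keys)})"
--         tail.append(line + "," if seen else line)
--         seen = True
--
--     for column_name, data_type, is_nullable, column_default in reversed(columns_info):
--         null_status = "NULL" if is_nullable == "YES" else "NOT NULL"
--         default = f"DEFAULT {column_default}" if column_default else ""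
--         line = f"{column_name} {data_type} {null_status} {default}".strip()
--         tail.append(line + "," if seen else line)
--         seen = True
--
--     tail.append(f"CREATE TABLE {table_name} (")
--     return "\n".join(reversed(tail))
-- ===== Notes on version B (the rewrite author's own statement) =====
-- stated objective: alternative
-- what changed: B constructs the statement back-to-front: it walks foreign keys, the PRIMARY KEY clause and the columns in reverse order, threading a 'seen' flag so a clause receives its comma exactly when a clause was already emitted below it, and reverses the line list at the end - replacing A's forward pass with per-line lookahead comma decisions (i < len-1, truthiness of primary_keys/foreign_keys, fk != foreign_keys[-1]).
-- intended difference: When an earlier foreign key tuple equals the last one, A compares each fk by value against foreign_keys[-1] and omits the comma after those earlier duplicates (invalid SQL); B's seen-flag rule emits the comma there, which is the intended statement. — e.g. on format_postgresql_create_table("t", [], none, some [("x", "r", "c"), ("x", "r", "c")]): A returns "CREATE TABLE t (\n FOREIGN KEY (x) REFERENCES r(c)\n FOREIGN KEY (x) REFERENCES r(c)\n);", B returns "CREATE TABLE t (\n FOREIGN KEY (x) REFERENCES r(c),\n FOREIGN KEY (x) REFERENCES r(c)\n);"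
import Mathlib
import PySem

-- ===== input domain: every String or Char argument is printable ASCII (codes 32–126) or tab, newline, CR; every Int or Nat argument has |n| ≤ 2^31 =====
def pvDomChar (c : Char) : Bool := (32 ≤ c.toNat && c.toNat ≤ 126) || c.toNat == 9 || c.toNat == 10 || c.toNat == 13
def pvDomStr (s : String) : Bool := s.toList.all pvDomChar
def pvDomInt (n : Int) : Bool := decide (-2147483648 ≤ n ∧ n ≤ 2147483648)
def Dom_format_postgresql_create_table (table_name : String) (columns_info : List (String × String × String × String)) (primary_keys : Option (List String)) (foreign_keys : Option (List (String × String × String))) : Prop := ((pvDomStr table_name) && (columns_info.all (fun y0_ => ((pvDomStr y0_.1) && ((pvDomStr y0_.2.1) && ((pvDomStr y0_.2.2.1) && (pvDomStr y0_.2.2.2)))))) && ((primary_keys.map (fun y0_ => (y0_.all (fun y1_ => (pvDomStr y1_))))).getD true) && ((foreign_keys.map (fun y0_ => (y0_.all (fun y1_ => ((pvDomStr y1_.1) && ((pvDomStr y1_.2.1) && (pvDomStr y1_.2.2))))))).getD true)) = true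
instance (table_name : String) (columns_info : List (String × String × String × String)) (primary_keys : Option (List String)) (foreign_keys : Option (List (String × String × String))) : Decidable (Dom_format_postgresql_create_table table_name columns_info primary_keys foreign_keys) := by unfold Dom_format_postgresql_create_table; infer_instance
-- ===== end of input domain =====

-- B builds the statement back-to-front (reverse traversal with a 'seen' flag deciding
-- each comma), replacing A's forward pass with lookahead comma decisions (objective: alternative).

-- Python truthiness of an optional list ('if primary_keys:', 'if foreign_keys:')
def pvTruthy {α : Type} (o : Option (List α)) : Bool :=
  match o with
  | none => false
  | some l => !l.isEmpty

-- ===== PORT A =====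
def format_postgresql_create_table (table_name : String) (columns_info : List (String × String × String × String)) (primary_keys : Option (List String)) (foreign_keys : Option (List (String × String × String))) : String :=
  let lines : List String := ["CREATE TABLE " ++ table_name ++ " ("]
  let lines := (PySem.List.enumerate columns_info).foldl (fun acc ic =>
      let null_status := if ic.2.2.2.1 = "YES" then "NULL" else "NOT NULL"
      let dflt := if ic.2.2.2.2 ≠ "" then "DEFAULT " ++ ic.2.2.2.2 else ""
      let column_line := PySem.Str.strip ("    " ++ ic.2.1 ++ " " ++ ic.2.2.1 ++ " " ++ null_status ++ " " ++ dflt)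
      let column_line := if ic.1 < PySem.List.len columns_info - 1 ∨ pvTruthy primary_keys = true ∨ pvTruthy foreign_keys = true then column_line ++ "," else column_line
      acc ++ [column_line]) lines
  let lines := if pvTruthy primary_keys then
      let pk_line := "    PRIMARY KEY (" ++ PySem.Str.join ", " (primary_keys.getD []) ++ ")"
      let pk_line := if pvTruthy foreign_keys then pk_line ++ "," else pk_line
      lines ++ [pk_line]
    else lines
  let lines := if pvTruthy foreign_keys then
      (foreign_keys.getD []).foldl (fun acc fk =>
        let fk_line := "    FOREIGN KEY (" ++ fk.1 ++ ") REFERENCES " ++ fk.2.1 ++ "(" ++ fk.2.2 ++ ")"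
        let fk_line := if some fk ≠ PySem.List.pyGet? (foreign_keys.getD []) (-1) then fk_line ++ "," else fk_line
        acc ++ [fk_line]) lines
    else lines
  PySem.Str.join "\n" (lines ++ [");"])

-- ===== PORT B =====
-- reverse traversal; each step appends the clause with a comma iff 'seen' (p.2) is set
def format_postgresql_create_table_alt (table_name : String) (columns_info : List (String × String × String × String)) (primary_keys : Option (List String)) (foreign_keys : Option (List (String × String × String))) : String :=
  let st : List String × Bool := ([");"], false)
  let st := (foreign_keys.getD []).reverse.foldl (fun (p : List String × Bool) fk =>
      let line := "    FOREIGN KEY (" ++ fk.1 ++ ") REFERENCES " ++ fk.2.1 ++ "(" ++ fk.2.2 ++ ")"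
      (p.1 ++ [if p.2 then line ++ "," else line], true)) st
  let st := if pvTruthy primary_keys then
      let line := "    PRIMARY KEY (" ++ PySem.Str.join ", " (primary_keys.getD []) ++ ")"
      ((st.1 ++ [if st.2 then line ++ "," else line], true) : List String × Bool)
    else st
  let st := columns_info.reverse.foldl (fun (p : List String × Bool) c =>
      let null_status := if c.2.2.1 = "YES" then "NULL" else "NOT NULL"
      let dflt := if c.2.2.2 ≠ "" then "DEFAULT " ++ c.2.2.2 else ""
      let line := PySem.Str.strip (c.1 ++ " " ++ c.2.1 ++ " " ++ null_status ++ " " ++ dflt)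
      (p.1 ++ [if p.2 then line ++ "," else line], true)) st
  PySem.Str.join "\n" ((st.1 ++ ["CREATE TABLE " ++ table_name ++ " ("]).reverse)

-- ===== PRECONDITION & SPEC =====
-- When some earlier foreign key equals the last one, A compares each fk BY VALUE against
-- foreign_keys[-1] and so omits the separating comma after those earlier duplicates
-- (invalid SQL); B's seen-flag rule puts a comma after every clause that is followed by
-- another, which is the intended statement.
def D_format_postgresql_create_table (table_name : String) (columns_info : List (String × String × String × String)) (primary_keys : Option (List String)) (foreign_keys : Option (List (String × String × String))) : Prop :=
  (match foreign_keys with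
   | none => false
   | some l => l.dropLast.any (fun x => decide (some x = l.getLast?))) = true
instance (table_name : String) (columns_info : List (String × String × String × String)) (primary_keys : Option (List String)) (foreign_keys : Option (List (String × String × String))) : Decidable (D_format_postgresql_create_table table_name columns_info primary_keys foreign_keys) := by unfold D_format_postgresql_create_table; infer_instance

def Spec_format_postgresql_create_table (table_name : String) (columns_info : List (String × String × String × String)) (primary_keys : Option (List String)) (foreign_keys : Option (List (String × String × String))) (out : String) : Prop := ¬ D_format_postgresql_create_table table_name columns_info primary_keys foreign_keys → out = format_postgresql_create_table_alt table_name columns_info primary_keys foreign_keys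
instance (table_name : String) (columns_info : List (String × String × String × String)) (primary_keys : Option (List String)) (foreign_keys : Option (List (String × String × String))) (out : String) : Decidable (Spec_format_postgresql_create_table table_name columns_info primary_keys foreign_keys out) := by unfold Spec_format_postgresql_create_table; infer_instance

def pvDiffWitness_format_postgresql_create_table : String × (List (String × String × String × String)) × Option (List String) × (Option (List (String × String × String))) :=
  ("t", [], none, some [("x", "r", "c"), ("x", "r", "c")])
def pvDiffWitnessOut_format_postgresql_create_table : String × String :=
  ("CREATE TABLE t (\n    FOREIGN KEY (x) REFERENCES r(c)\n    FOREIGN KEY (x) REFERENCES r(c)\n);",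
   "CREATE TABLE t (\n    FOREIGN KEY (x) REFERENCES r(c),\n    FOREIGN KEY (x) REFERENCES r(c)\n);")

-- ===== CLAIM (what is proved, stated in full; the proofs are below) =====
def Claim_unchanged_format_postgresql_create_table : Prop := ∀ (table_name : String) (columns_info : List (String × String × String × String)) (primary_keys : Option (List String)) (foreign_keys : Option (List (String × String × String))), Dom_format_postgresql_create_table table_name columns_info primary_keys foreign_keys → Spec_format_postgresql_create_table table_name columns_info primary_keys foreign_keys (format_postgresql_create_table table_name columns_info primary_keys foreign_keys)
def Claim_changed_format_postgresql_create_table : Prop := Dom_format_postgresql_create_table (pvDiffWitness_format_postgresql_create_table.1) (pvDiffWitness_format_postgresql_create_table.2.1) (pvDiffWitness_format_postgresql_create_table.2.2.1) (pvDiffWitness_format_postgresql_create_table.2.2.2) ∧ D_format_postgresql_create_table (pvDiffWitness_format_postgresql_create_table.1) (pvDiffWitness_format_postgresql_create_table.2.1) (pvDiffWitness_format_postgresql_create_table.2.2.1) (pvDiffWitness_format_postgresql_create_table.2.2.2) ∧ format_postgresql_create_table (pvDiffWitness_format_postgresql_create_table.1) (pvDiffWitness_format_postgresql_create_table.2.1)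 (pvDiffWitness_format_postgresql_create_table.2.2.1) (pvDiffWitness_format_postgresql_create_table.2.2.2) = pvDiffWitnessOut_format_postgresql_create_table.1 ∧ format_postgresql_create_table_alt (pvDiffWitness_format_postgresql_create_table.1) (pvDiffWitness_format_postgresql_create_table.2.1) (pvDiffWitness_format_postgresql_create_table.2.2.1) (pvDiffWitness_format_postgresql_create_table.2.2.2) = pvDiffWitnessOut_format_postgresql_create_table.2 ∧ pvDiffWitnessOut_format_postgresql_create_table.1 ≠ pvDiffWitnessOut_format_postgresql_create_table.2

-- ===== LEMMAS AND PROOFS =====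

-- the clauses of B's reverse traversal: first one (lowest clause) bare, later ones with comma
def pvEmit (b : Bool) (L : List String) : List String :=
  match b, L with
  | _, [] => []
  | true, l => l.map (fun s => s ++ ",")
  | false, h :: t => h :: t.map (fun s => s ++ ",")

-- B's (lines, seen) step-fold, characterised
theorem pv_fold_emit {α : Type} (g : α → String) :
    ∀ (L : List α) (acc : List String) (b : Bool),
      L.foldl (fun (p : List String × Bool) x =>
        (p.1 ++ [if p.2 then g x ++ "," else g x], true)) (acc, b)
      = (acc ++ pvEmit b (L.map g), b || !L.isEmpty) := by
  intro L
  induction L with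
  | nil => intro acc b; simp [pvEmit]
  | cons h t ih =>
    intro acc b
    rw [List.foldl_cons, ih]
    cases b <;> simp [pvEmit] <;> cases t <;> simp [pvEmit]

theorem pvEmit_append (b : Bool) (X Y : List String) :
    pvEmit b X ++ pvEmit (b || !X.isEmpty) Y = pvEmit b (X ++ Y) := by
  cases b <;> cases X <;> cases Y <;> simp [pvEmit]

theorem pvEmit_append' (A : List String) (b : Bool) (X Y : List String) :
    A ++ pvEmit b X ++ pvEmit (b || !X.isEmpty) Y = A ++ pvEmit b (X ++ Y) := by
  rw [List.append_assoc, pvEmit_append]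

theorem pvEmit_single (b : Bool) (l : String) : [if b then l ++ "," else l] = pvEmit b [l] := by
  cases b <;> simp [pvEmit]

-- reversing the bottom-up clause list gives the positional comma rule
theorem pvEmit_reverse (F : List String) :
    (pvEmit false F.reverse).reverse
      = F.dropLast.map (fun s => s ++ ",") ++ F.drop (F.length - 1) := by
  induction F using List.reverseRecOn with
  | nil => simp [pvEmit]
  | append_singleton q a _ =>
    rw [List.reverse_append, List.reverse_singleton]
    simp only [List.singleton_append, pvEmit]
    rw [List.reverse_cons, List.map_reverse, List.reverse_reverse,
        List.dropLast_concat]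
    have h : (q ++ [a]).length - 1 = q.length := by simp
    rw [h, List.drop_left']
    simp

-- the two CREATE-TABLE clause texts coincide: the 4-space indent is eaten by .strip()
theorem pv_strip_indent (s : String) : PySem.Str.strip ("    " ++ s) = PySem.Str.strip s := by
  have h : ("    " ++ s).toList = ' ' :: ' ' :: ' ' :: ' ' :: s.toList := by simp
  simp [PySem.Str.strip, h, show PySem.Chars.isspace ' ' = true from rfl,
        PySem.Chars.strip, PySem.Chars.lstrip]

-- an append-accumulator loop is init ++ map
theorem pv_foldl_append {α β : Type} (g : α → β) :
    ∀ (l : List α) (init : List β), l.foldl (fun acc x => acc ++ [g x]) init = init ++ l.map g := by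
  intro l
  induction l with
  | nil => simp
  | cons x t ih => intro init; simp [List.foldl_cons, ih]

-- enumerate-map when the comma condition holds by its right disjunct at every index
theorem pv_enum_map_or_true {α : Type} (f : α → String) (n : Int) (Q : Prop) [Decidable Q]
    (hQ : Q) (m : List α) (s : Int) :
    (PySem.List.enumerate m s).map (fun ic => if ic.1 < n ∨ Q then f ic.2 ++ "," else f ic.2)
      = m.map (fun c => f c ++ ",") := by
  have h1 : (fun ic : Int × α => if ic.1 < n ∨ Q then f ic.2 ++ "," else f ic.2)
      = (fun c => f c ++ ",") ∘ (fun ic : Int × α => ic.2) := by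
    funext ic; rw [if_pos (Or.inr hQ)]; rfl
  rw [h1, ← List.map_map, PySem.List.map_snd_enumerate]

-- enumerate-map with threshold n: indices below n get the comma
theorem pv_enum_map_split {α : Type} (f : α → String) (n : Int) :
    ∀ (m : List α) (s : Int),
      (PySem.List.enumerate m s).map (fun ic => if ic.1 < n then f ic.2 ++ "," else f ic.2)
        = (m.take (n - s).toNat).map (fun c => f c ++ ",") ++ (m.drop (n - s).toNat).map f := by
  intro m
  induction m with
  | nil => intro s; simp [PySem.List.enumerate]
  | cons x t ih =>
    intro s
    rw [PySem.List.enumerate_cons, List.map_cons, ih (s + 1)]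
    by_cases hs : s < n
    · have h1 : (n - s).toNat = (n - (s + 1)).toNat + 1 := by omega
      rw [if_pos hs, h1, List.take_succ_cons, List.drop_succ_cons, List.map_cons, List.cons_append]
    · have h1 : (n - s).toNat = 0 := by omega
      have h2 : (n - (s + 1)).toNat = 0 := by omega
      rw [if_neg hs, h1, h2, List.take_zero, List.drop_zero, List.take_zero, List.drop_zero,
          List.map_nil, List.nil_append, List.nil_append, List.map_cons]

-- with no primary/foreign keys the comma condition is purely positional
theorem pv_enum_map_or_false {α : Type} (f : α → String) (Q : Prop) [Decidable Q]
    (hQ : ¬ Q) (m : List α) :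
    (PySem.List.enumerate m 0).map (fun ic => if ic.1 < PySem.List.len m - 1 ∨ Q then f ic.2 ++ "," else f ic.2)
      = m.dropLast.map (fun c => f c ++ ",") ++ (m.drop (m.length - 1)).map f := by
  have h1 : ∀ ic : Int × α,
      (if ic.1 < PySem.List.len m - 1 ∨ Q then f ic.2 ++ "," else f ic.2)
        = (if ic.1 < PySem.List.len m - 1 then f ic.2 ++ "," else f ic.2) := by
    intro ic
    by_cases h : ic.1 < PySem.List.len m - 1
    · rw [if_pos (Or.inl h), if_pos h]
    · rw [if_neg (by tauto), if_neg h]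
  simp only [h1]
  rw [pv_enum_map_split f (PySem.List.len m - 1) m 0]
  have h2 : (PySem.List.len m - 1 - 0).toNat = m.length - 1 := by
    rw [PySem.List.len_eq]; omega
  rw [h2, ← List.dropLast_eq_take]

-- A's indented clause equals B's unindented one: .strip() eats the indent
theorem pv_clause_eq (a b ns ds : String) :
    PySem.Str.strip ("    " ++ a ++ " " ++ b ++ " " ++ ns ++ " " ++ ds)
      = PySem.Str.strip (a ++ " " ++ b ++ " " ++ ns ++ " " ++ ds) := by
  rw [show "    " ++ a ++ " " ++ b ++ " " ++ ns ++ " " ++ ds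
        = "    " ++ (a ++ " " ++ b ++ " " ++ ns ++ " " ++ ds) by
      simp [String.append_assoc], pv_strip_indent]

-- A's value-compared fk commas equal the positional rule when no earlier fk equals the last
theorem pv_fk_map {α : Type} [DecidableEq α] (g : α → String) :
    ∀ (l : List α), l ≠ [] →
      (l.dropLast.any (fun x => decide (some x = l.getLast?)) = false) →
      l.map (fun fk => if some fk ≠ l.getLast? then g fk ++ "," else g fk)
        = l.dropLast.map (fun c => g c ++ ",") ++ (l.drop (l.length - 1)).map g := by
  intro l hne hd
  induction l using List.reverseRecOn with
  | nil => exact absurd rfl hne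
  | append_singleton m a _ =>
    rw [List.getLast?_concat] at hd ⊢
    rw [List.dropLast_concat] at hd
    have hm : ∀ x ∈ m, x ≠ a := by
      intro x hx hxa
      have := List.any_eq_false.1 hd x hx
      simp [hxa] at this
    have h1 : m.map (fun fk => if some fk ≠ some a then g fk ++ "," else g fk)
        = m.map (fun c => g c ++ ",") := by
      apply List.map_congr_left; intro x hx
      rw [if_pos (by simp [hm x hx])]
    have h4 : (m ++ [a]).length - 1 = m.length := by simp
    rw [List.map_append, h1, List.dropLast_concat, h4, List.drop_left',
        List.map_cons, List.map_nil]
    simp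
    rfl

-- both drops pick the final element of a nonempty right part
theorem pv_drop_last_append {α : Type} (q r : List α) (h : r ≠ []) :
    (q ++ r).drop ((q ++ r).length - 1) = r.drop (r.length - 1) := by
  have hr : 1 ≤ r.length := List.length_pos_of_ne_nil h
  have h0 : (q ++ r).length - 1 = q.length + (r.length - 1) := by simp [List.length_append]; omega
  rw [h0, List.drop_append, List.drop_eq_nil_of_le (by omega), List.nil_append]
  congr 1
  omega

-- the forward clause lists of the two programs
def pvColLine (c : String × String × String × String) : String :=
  PySem.Str.strip (c.1 ++ " " ++ c.2.1 ++ " " ++ (if c.2.2.1 = "YES" then "NULL" else "NOT NULL")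
    ++ " " ++ (if c.2.2.2 ≠ "" then "DEFAULT " ++ c.2.2.2 else ""))
def pvFkLine (fk : String × String × String) : String :=
  "    FOREIGN KEY (" ++ fk.1 ++ ") REFERENCES " ++ fk.2.1 ++ "(" ++ fk.2.2 ++ ")"
def pvBody (columns_info : List (String × String × String × String)) (primary_keys : Option (List String)) (foreign_keys : Option (List (String × String × String))) : List String :=
  columns_info.map pvColLine
    ++ (if pvTruthy primary_keys then ["    PRIMARY KEY (" ++ PySem.Str.join ", " (primary_keys.getD []) ++ ")"] else [])
    ++ (foreign_keys.getD []).map pvFkLine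

-- B equals the positional comma rule over the forward body list
theorem pv_alt_positional (tn : String) (cols : List (String × String × String × String))
    (pks : Option (List String)) (fks : Option (List (String × String × String))) :
    format_postgresql_create_table_alt tn cols pks fks
      = PySem.Str.join "\n"
          (["CREATE TABLE " ++ tn ++ " ("]
            ++ (pvBody cols pks fks).dropLast.map (fun s => s ++ ",")
            ++ (pvBody cols pks fks).drop ((pvBody cols pks fks).length - 1)
            ++ [");"]) := by
  have h0 : format_postgresql_create_table_alt tn cols pks fks
      = PySem.Str.join "\n"
          (((cols.reverse.foldl
              (fun (p : List String × Bool) c =>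
                (p.1 ++ [if p.2 then pvColLine c ++ "," else pvColLine c], true))
              (if pvTruthy pks then
                (((fks.getD []).reverse.foldl
                    (fun (p : List String × Bool) fk =>
                      (p.1 ++ [if p.2 then pvFkLine fk ++ "," else pvFkLine fk], true))
                    ([");"], false)).1
                  ++ [if ((fks.getD []).reverse.foldl
                        (fun (p : List String × Bool) fk =>
                          (p.1 ++ [if p.2 then pvFkLine fk ++ "," else pvFkLine fk], true))
                        ([");"], false)).2 then
                        ("    PRIMARY KEY (" ++ PySem.Str.join ", " (pks.getD []) ++ ")") ++ ","
                      else "    PRIMARY KEY (" ++ PySem.Str.join ", " (pks.getD []) ++ ")"], true)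
              else
                (fks.getD []).reverse.foldl
                  (fun (p : List String × Bool) fk =>
                    (p.1 ++ [if p.2 then pvFkLine fk ++ "," else pvFkLine fk], true))
                  ([");"], false))).1
            ++ ["CREATE TABLE " ++ tn ++ " ("]).reverse) := rfl
  rw [h0, pv_fold_emit pvFkLine]
  have hpk : (if pvTruthy pks then
        ((([");"] ++ pvEmit false ((fks.getD []).reverse.map pvFkLine))
            ++ [if (false || !((fks.getD []).reverse.isEmpty)) then
                  ("    PRIMARY KEY (" ++ PySem.Str.join ", " (pks.getD []) ++ ")") ++ ","
                else "    PRIMARY KEY (" ++ PySem.Str.join ", " (pks.getD []) ++ ")"], true)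
          : List String × Bool)
      else (([");"] ++ pvEmit false ((fks.getD []).reverse.map pvFkLine),
             false || !((fks.getD []).reverse.isEmpty)) : List String × Bool))
      = (([");"]
          ++ pvEmit false ((fks.getD []).reverse.map pvFkLine
              ++ (if pvTruthy pks then ["    PRIMARY KEY (" ++ PySem.Str.join ", " (pks.getD []) ++ ")"] else [])),
         false || !(((fks.getD []).reverse.map pvFkLine
              ++ (if pvTruthy pks then ["    PRIMARY KEY (" ++ PySem.Str.join ", " (pks.getD []) ++ ")"] else [])).isEmpty))
          : List String × Bool) := by
    by_cases hP : pvTruthy pks = true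
    · have hE : (false || !((fks.getD []).reverse.isEmpty))
          = (false || !(((fks.getD []).reverse.map pvFkLine).isEmpty)) := by simp
      rw [if_pos hP, if_pos hP, hE, pvEmit_single, List.append_assoc, pvEmit_append]
      simp
    · rw [if_neg hP, if_neg hP]
      simp [pvEmit]
  rw [hpk, pv_fold_emit pvColLine]
  rw [pvEmit_append']
  have hbody : ((fks.getD []).reverse.map pvFkLine
        ++ (if pvTruthy pks then ["    PRIMARY KEY (" ++ PySem.Str.join ", " (pks.getD []) ++ ")"] else [])
        ++ cols.reverse.map pvColLine)
      = (pvBody cols pks fks).reverse := by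
    unfold pvBody
    by_cases hP : pvTruthy pks = true <;>
      simp [hP, List.map_reverse, List.reverse_append]
  rw [hbody]
  have hlines : (([");"] ++ pvEmit false (pvBody cols pks fks).reverse)
        ++ ["CREATE TABLE " ++ tn ++ " ("]).reverse
      = ["CREATE TABLE " ++ tn ++ " ("]
          ++ (pvEmit false (pvBody cols pks fks).reverse).reverse
          ++ [");"] := by
    simp
  rw [hlines, pvEmit_reverse]
  simp [List.append_assoc]

theorem pvColLine_def : pvColLine = (fun c : String × String × String × String =>
    PySem.Str.strip (c.1 ++ " " ++ c.2.1 ++ " " ++ (if c.2.2.1 = "YES" then "NULL" else "NOT NULL")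
      ++ " " ++ (if c.2.2.2 ≠ "" then "DEFAULT " ++ c.2.2.2 else ""))) := rfl
theorem pvFkLine_def : pvFkLine = (fun fk : String × String × String =>
    "    FOREIGN KEY (" ++ fk.1 ++ ") REFERENCES " ++ fk.2.1 ++ "(" ++ fk.2.2 ++ ")") := rfl

theorem format_postgresql_create_table_spec' :
    ∀ (table_name : String) (columns_info : List (String × String × String × String)) (primary_keys : Option (List String)) (foreign_keys : Option (List (String × String × String))),
    ¬ D_format_postgresql_create_table table_name columns_info primary_keys foreign_keys →
    format_postgresql_create_table table_name columns_info primary_keys foreign_keys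
      = format_postgresql_create_table_alt table_name columns_info primary_keys foreign_keys := by
  intro tn cols pks fks hD
  rw [pv_alt_positional]
  unfold pvBody
  rw [pvColLine_def, pvFkLine_def]
  by_cases hF : pvTruthy fks = true
  · obtain ⟨l, rfl⟩ : ∃ l, fks = some l := by
      cases fks with
      | none => simp [pvTruthy] at hF
      | some l => exact ⟨l, rfl⟩
    have hl : l ≠ [] := by
      intro h; subst h; simp [pvTruthy] at hF
    have hlm : l.map (fun fk : String × String × String =>
        "    FOREIGN KEY (" ++ fk.1 ++ ") REFERENCES " ++ fk.2.1 ++ "(" ++ fk.2.2 ++ ")") ≠ [] := by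
      simp [hl]
    have hd : l.dropLast.any (fun x => decide (some x = l.getLast?)) = false := by
      simp only [D_format_postgresql_create_table, Bool.not_eq_true] at hD
      exact hD
    simp only [format_postgresql_create_table, Option.getD_some,
               PySem.List.pyGet?_neg_one, pv_foldl_append, pv_clause_eq]
    rw [pv_enum_map_or_true
          (fun c : String × String × String × String =>
            PySem.Str.strip (c.1 ++ " " ++ c.2.1 ++ " " ++ (if c.2.2.1 = "YES" then "NULL" else "NOT NULL")
              ++ " " ++ (if c.2.2.2 ≠ "" then "DEFAULT " ++ c.2.2.2 else "")))
          (PySem.List.len cols - 1) (pvTruthy pks = true ∨ pvTruthy (some l) = true)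
          (Or.inr hF) cols 0]
    simp only [if_pos hF]
    rw [pv_fk_map
          (fun fk : String × String × String =>
            "    FOREIGN KEY (" ++ fk.1 ++ ") REFERENCES " ++ fk.2.1 ++ "(" ++ fk.2.2 ++ ")")
          l hl hd,
        List.dropLast_append_of_ne_nil hlm,
        pv_drop_last_append _ _ hlm]
    by_cases hP : pvTruthy pks = true <;>
      simp [hP, pvColLine, pvFkLine, List.map_append, List.map_map, Function.comp_def, List.append_assoc,
            ← List.map_dropLast, List.map_drop, List.length_map]
  · have hfkc : (fks.getD []).map (fun fk : String × String × String =>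
        "    FOREIGN KEY (" ++ fk.1 ++ ") REFERENCES " ++ fk.2.1 ++ "(" ++ fk.2.2 ++ ")") = [] := by
      cases fks with
      | none => rfl
      | some l =>
        have : l = [] := by
          cases l with
          | nil => rfl
          | cons x t => simp [pvTruthy] at hF
        simp [this]
    simp only [format_postgresql_create_table, pv_foldl_append, pv_clause_eq]
    simp only [if_neg hF, hfkc, List.append_nil]
    by_cases hP : pvTruthy pks = true
    · rw [pv_enum_map_or_true
            (fun c : String × String × String × String =>
              PySem.Str.strip (c.1 ++ " " ++ c.2.1 ++ " " ++ (if c.2.2.1 = "YES" then "NULL" else "NOT NULL")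
                ++ " " ++ (if c.2.2.2 ≠ "" then "DEFAULT " ++ c.2.2.2 else "")))
            (PySem.List.len cols - 1) (pvTruthy pks = true ∨ pvTruthy fks = true)
            (Or.inl hP) cols 0]
      simp only [if_pos hP]
      simp [pvColLine, pvFkLine, List.map_append, List.map_map, Function.comp_def, List.append_assoc,
            List.dropLast_concat, List.drop_left']
    · rw [pv_enum_map_or_false
            (fun c : String × String × String × String =>
              PySem.Str.strip (c.1 ++ " " ++ c.2.1 ++ " " ++ (if c.2.2.1 = "YES" then "NULL" else "NOT NULL")
                ++ " " ++ (if c.2.2.2 ≠ "" then "DEFAULT " ++ c.2.2.2 else "")))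
            (pvTruthy pks = true ∨ pvTruthy fks = true) (by tauto) cols]
      simp only [if_neg hP]
      simp [pvColLine, pvFkLine, List.map_append, List.map_map, Function.comp_def, List.append_assoc,
            ← List.map_dropLast, List.map_drop, List.length_map]

-- ===== VERDICT (by name: the statement is the Claim_ definition above) =====
theorem format_postgresql_create_table_spec : Claim_unchanged_format_postgresql_create_table := by
  intro tn cols pks fks _ hD
  exact format_postgresql_create_table_spec' tn cols pks fks hD

theorem format_postgresql_create_table_changed : Claim_changed_format_postgresql_create_table := by
  unfold Claim_changed_format_postgresql_create_table; decide
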